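-- pv_equiv track=rewrite | github.com/xhd24/Gun-Gang-Coding-Study | 프로그래머스/2/17679. ［1차］ 프렌즈4블록/［1차］ 프렌즈4블록.py | solution
-- ===== SOURCE A (Python) =====
-- def solution(m, n, board):
--     _board = []
--     answer = 0
--     flag=True
--
--     for v in board:
--         _board.append(list(v))
--
--     while(flag):
--         queue = []
--
--         for i in range(m - 1):
--             for j in range(n - 1):
--                 block1 = _board[i][j]
--                 block2 = _board[i][j + 1]
--                 block3 = _board[i + 1][j]
--                 block4 = _board[i + 1][j + 1]
--                 if block1 == block2 == block3 == block4 and block1 != 0: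
--                     queue.append((i, j))
--                     queue.append((i, j + 1))
--                     queue.append((i + 1, j))
--                     queue.append((i + 1, j + 1))
--                 else:
--                     continue
--         if (len(queue) == 0):
--             flag=False
--             break
--
--         queue2 = set(queue)
--         queue3 = sorted(list(queue2), key=lambda x: x[0])
--
--         while (queue3):
--             i, j = queue3.pop(0)
--             answer = answer + 1
--             fall(i, j, _board)
--
--     return answer
--
-- def fall(i,j,_board):
--     if i==0:
--         _board[i][j]=0
--         return _board
--     _board[i][j]=_board[i-1][j]
--     fall(i-1,j,_board)
--     return _board
-- ===== SOURCE B (Python) =====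
-- def solution(m, n, board):
--     # Column-major re-implementation: board is transposed into n columns once;
--     # each round the same 2x2 scan collects a removal set, and gravity is applied
--     # per column by compacting survivors to the bottom (no recursive cell-by-cell fall).
--     if m < 2 or n < 2:
--         return 0
--     cols = [[board[i][j] for i in range(m)] for j in range(n)]
--     answer = 0
--     while True:
--         removed = set()
--         for i in range(m - 1):
--             for j in range(n - 1):
--                 b = cols[j][i]
--                 if b != 0 and b == cols[j + 1][i] == cols[j][i + 1] == cols[j + 1][i + 1]:
--                     removed.update(((i, j), (i, j + 1), (i + 1, j), (i + 1, j + 1)))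
--         if not removed:
--             return answer
--         answer += len(removed)
--         for j in range(n):
--             survivors = [cols[j][i] for i in range(m) if (i, j) not in removed]
--             cols[j] = [0] * (m - len(survivors)) + survivors
-- ===== Notes on version B (the rewrite author's own statement) =====
-- stated objective: alternative
-- what changed: B stores the board column-major (transposed once) and applies gravity by compacting each column's survivors to the bottom in one batch per round, instead of A's per-cell recursive fall executed over a row-sorted list of removed positions.
import Mathlib
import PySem

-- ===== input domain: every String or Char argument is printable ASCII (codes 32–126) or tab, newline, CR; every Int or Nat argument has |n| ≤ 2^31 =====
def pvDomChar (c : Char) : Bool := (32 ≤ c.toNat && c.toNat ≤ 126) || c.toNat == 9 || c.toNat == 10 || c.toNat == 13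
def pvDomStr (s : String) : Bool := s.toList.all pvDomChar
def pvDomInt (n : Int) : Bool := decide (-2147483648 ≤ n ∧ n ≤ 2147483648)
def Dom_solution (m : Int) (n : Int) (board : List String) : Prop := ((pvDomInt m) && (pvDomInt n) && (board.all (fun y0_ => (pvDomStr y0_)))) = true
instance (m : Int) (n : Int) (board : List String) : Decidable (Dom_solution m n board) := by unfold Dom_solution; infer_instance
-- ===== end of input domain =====

-- B re-implements the game column-major with batch per-column gravity instead of A's
-- recursive per-cell fall over a row-sorted removal list; equal return value proved on Pre_.
-- Board cells are `Option Char`: `some c` is a character, `none` is the int 0 filler A writes.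

-- ===== PORT A =====
-- _board[i][j] / cols[j][i] read (shared by both ports) and write; exact for the
-- in-range non-negative indices that occur on Pre_.
def pvGet2 (g : List (List (Option Char))) (i j : Int) : Option Char :=
  (g.getD i.toNat []).getD j.toNat none

def pvSet2 (g : List (List (Option Char))) (i j : Int) (v : Option Char) :
    List (List (Option Char)) :=
  g.set i.toNat ((g.getD i.toNat []).set j.toNat v)

-- fall(i, j, _board): Python tests `i == 0`; the guard `i ≤ 0` only totalizes the
-- negative case, which A never reaches (queue rows are ≥ 0).
def pvFall (i j : Int) (g : List (List (Option Char))) : List (List (Option Char)) :=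
  if i ≤ 0 then pvSet2 g i j none
  else pvFall (i - 1) j (pvSet2 g i j (pvGet2 g (i - 1) j))
termination_by i.toNat
decreasing_by omega

-- the nested 2×2 scan building `queue` (with duplicates, in scan order)
def pvScanA (m n : Int) (g : List (List (Option Char))) : List (Int × Int) :=
  (PySem.List.pyRange 0 (m - 1) 1).foldl (fun q i =>
    (PySem.List.pyRange 0 (n - 1) 1).foldl (fun q j =>
      let b1 := pvGet2 g i j
      let b2 := pvGet2 g i (j + 1)
      let b3 := pvGet2 g (i + 1) j
      let b4 := pvGet2 g (i + 1) (j + 1)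
      if b1 = b2 ∧ b2 = b3 ∧ b3 = b4 ∧ b1 ≠ none then
        q ++ [(i, j), (i, j + 1), (i + 1, j), (i + 1, j + 1)]
      else q) q) []

-- the outer `while flag` loop. Fuel only totalizes it: every iteration that does not
-- break removes ≥ 4 window cells, so at most m.toNat*n.toNat+1 iterations ever run.
-- Python sorts the hash-ordered set with key x[0]; ties (equal rows) are falls on
-- distinct columns, which commute, so the returned answer is order-independent and we
-- sort the insertion-ordered set.
def pvLoopA (m n : Int) : Nat → List (List (Option Char)) → Int → Int
  | 0, _, ans => ans
  | fuel + 1, g, ans =>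
    let queue := pvScanA m n g
    if queue.length = 0 then ans
    else
      let q3 := PySem.List.sorted (PySem.Set.ofList queue) (fun p => p.1)
      let st := q3.foldl
        (fun (p : Int × List (List (Option Char))) pos => (p.1 + 1, pvFall pos.1 pos.2 p.2))
        (ans, g)
      pvLoopA m n fuel st.2 st.1

def solution (m : Int) (n : Int) (board : List String) : Int :=
  pvLoopA m n (m.toNat * n.toNat + 1) (board.map (fun s => s.toList.map some)) 0

-- ===== PORT B =====
-- the same 2×2 scan, collecting the removal set directly
def pvScanB (m n : Int) (cols : List (List (Option Char))) : PySem.Set (Int × Int) :=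
  (PySem.List.pyRange 0 (m - 1) 1).foldl (fun s i =>
    (PySem.List.pyRange 0 (n - 1) 1).foldl (fun s j =>
      let b := pvGet2 cols j i
      if b ≠ none ∧ b = pvGet2 cols (j + 1) i ∧
          pvGet2 cols (j + 1) i = pvGet2 cols j (i + 1) ∧
          pvGet2 cols j (i + 1) = pvGet2 cols (j + 1) (i + 1) then
        PySem.Set.update s [(i, j), (i, j + 1), (i + 1, j), (i + 1, j + 1)]
      else s) s) PySem.Set.empty

-- batch gravity: each column keeps its survivors at the bottom, zeros (`none`) on top
def pvGravity (m n : Int) (removed : PySem.Set (Int × Int))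
    (cols : List (List (Option Char))) : List (List (Option Char)) :=
  (PySem.List.pyRange 0 n 1).foldl (fun cs j =>
    let surv := ((PySem.List.pyRange 0 m 1).filter
        (fun i => !(PySem.Set.contains removed (i, j)))).map (fun i => pvGet2 cs j i)
    cs.set j.toNat (List.replicate (m - (surv.length : Int)).toNat none ++ surv)) cols

-- B's `while True` loop; same fuel-totalization remark as for pvLoopA.
def pvLoopB (m n : Int) : Nat → List (List (Option Char)) → Int → Int
  | 0, _, ans => ans
  | fuel + 1, cols, ans =>
    let removed := pvScanB m n cols
    if removed.length = 0 then ans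
    else pvLoopB m n fuel (pvGravity m n removed cols) (ans + removed.length)

def solution_alt (m : Int) (n : Int) (board : List String) : Int :=
  if m < 2 ∨ n < 2 then 0
  else
    let cols := (PySem.List.pyRange 0 n 1).map (fun j =>
      (PySem.List.pyRange 0 m 1).map (fun i =>
        (some (((board.getD i.toNat "").toList).getD j.toNat ' ') : Option Char)))
    pvLoopB m n (m.toNat * n.toNat + 1) cols 0

-- ===== PRECONDITION & SPEC =====
-- Exactly the inputs where A returns: otherwise A's `_board[i][j]` raises IndexError
-- (board shorter than m rows, or one of the first m rows shorter than n, with m,n ≥ 2).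
def Pre_solution (m : Int) (n : Int) (board : List String) : Prop :=
  m ≤ 1 ∨ n ≤ 1 ∨
    (m ≤ (board.length : Int) ∧ ∀ s ∈ board.take m.toNat, n ≤ (s.length : Int))
instance (m : Int) (n : Int) (board : List String) : Decidable (Pre_solution m n board) := by
  unfold Pre_solution; infer_instance

def pvWitness_solution : Int × Int × List String := (2, 2, ["ab", "cd"])

def Spec_solution (m : Int) (n : Int) (board : List String) (out : Int) : Prop :=
  out = solution_alt m n board
instance (m : Int) (n : Int) (board : List String) (out : Int) :
    Decidable (Spec_solution m n board out) := by unfold Spec_solution; infer_instance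

-- ===== CLAIM (what is proved, stated in full; the proofs are below) =====
def Claim_equal_solution : Prop := ∀ (m : Int) (n : Int) (board : List String),
  Dom_solution m n board → Pre_solution m n board →
  Spec_solution m n board (solution m n board)

-- ===== LEMMAS AND PROOFS =====

-- the m'×n' window, invariants, and the column view used throughout the proof
def pvGoodA (m' n' : Nat) (g : List (List (Option Char))) : Prop :=
  m' ≤ g.length ∧ ∀ r ∈ g.take m', n' ≤ r.length

def pvGoodB (m' n' : Nat) (cols : List (List (Option Char))) : Prop :=
  cols.length = n' ∧ ∀ c ∈ cols, c.length = m'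

def pvWEq (m' n' : Nat) (g cols : List (List (Option Char))) : Prop :=
  ∀ r < m', ∀ c < n', pvGet2 g r c = pvGet2 cols c r

def pvWcol (m' : Nat) (g : List (List (Option Char))) (c : Nat) : List (Option Char) :=
  (List.range m').map (fun r : Nat => pvGet2 g (↑r) (↑c))

def pvDelAt (col : List (Option Char)) (k : Nat) : List (Option Char) :=
  none :: (col.take k ++ col.drop (k + 1))

-- basics
theorem pvRowLen {m' n' : Nat} {g : List (List (Option Char))} (hg : pvGoodA m' n' g)
    {r : Nat} (hr : r < m') : n' ≤ (g.getD r []).length := by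
  obtain ⟨h1, h2⟩ := hg
  have hrl : r < g.length := lt_of_lt_of_le hr h1
  have : g[r] ∈ g.take m' := by
    rw [List.mem_take_iff_getElem]
    exact ⟨r, by omega, by simp⟩
  have := h2 _ this
  rwa [List.getD_eq_getElem?_getD, List.getElem?_eq_getElem hrl]

theorem pvGet2_natCast (g : List (List (Option Char))) (r c : Nat) :
    pvGet2 g (↑r) (↑c) = (g.getD r []).getD c none := by
  simp [pvGet2]

theorem pvSet2_length (g : List (List (Option Char))) (i j : Int) (v : Option Char) :
    (pvSet2 g i j v).length = g.length := by simp [pvSet2]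

theorem pvSet2_getD_row (g : List (List (Option Char))) (i j : Int) (v : Option Char)
    (r : Nat) : (pvSet2 g i j v).getD r [] =
      if i.toNat = r ∧ i.toNat < g.length then (g.getD i.toNat []).set j.toNat v
      else g.getD r [] := by
  unfold pvSet2
  rw [List.getD_eq_getElem?_getD, List.getD_eq_getElem?_getD, List.getElem?_set]
  split_ifs with h1 h2 h3 h3 <;> simp_all

theorem pvSet2_row_length (g : List (List (Option Char))) (i j : Int) (v : Option Char)
    (r : Nat) : ((pvSet2 g i j v).getD r []).length = (g.getD r []).length := by
  rw [pvSet2_getD_row]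
  split_ifs with h
  · rw [List.length_set]; rw [h.1]
  · rfl

theorem pvGoodA_set2 {m' n' : Nat} {g : List (List (Option Char))} (hg : pvGoodA m' n' g)
    (i j : Int) (v : Option Char) : pvGoodA m' n' (pvSet2 g i j v) := by
  obtain ⟨h1, h2⟩ := hg
  refine ⟨by rw [pvSet2_length]; exact h1, ?_⟩
  intro r hr
  rw [List.mem_take_iff_getElem] at hr
  obtain ⟨k, hk, rfl⟩ := hr
  have hkg : k < (pvSet2 g i j v).length := by omega
  have hlen : ((pvSet2 g i j v).getD k []).length = (g.getD k []).length :=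
    pvSet2_row_length g i j v k
  rw [List.getD_eq_getElem?_getD, List.getElem?_eq_getElem hkg] at hlen
  simp only [Option.getD_some] at hlen
  rw [hlen]
  exact pvRowLen ⟨h1, h2⟩ (show k < m' by rw [pvSet2_length] at hkg; omega)

theorem pvGet2_pvSet2 {g : List (List (Option Char))} {i j : Nat}
    (hi : i < g.length) (hj : j < (g.getD i []).length) (v : Option Char) (r c : Nat) :
    pvGet2 (pvSet2 g (↑i) (↑j) v) (↑r) (↑c) =
      if r = i ∧ c = j then v else pvGet2 g (↑r) (↑c) := by
  rw [pvGet2_natCast, pvGet2_natCast, pvSet2_getD_row]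
  simp only [Int.toNat_natCast]
  by_cases hr : r = i
  · subst hr
    rw [if_pos ⟨rfl, hi⟩]
    rw [List.getD_eq_getElem?_getD, List.getElem?_set]
    by_cases hc : c = j
    · subst hc
      rw [if_pos rfl, if_pos hj]
      simp
    · rw [if_neg (Ne.symm hc), ← List.getD_eq_getElem?_getD]
      simp [hc]
  · rw [if_neg (by omega)]
    simp [hr]

-- fall characterization
theorem pvFall_zero (j : Int) (g : List (List (Option Char))) :
    pvFall 0 j g = pvSet2 g 0 j none := by
  rw [pvFall]; simp

theorem pvFall_succ (k : Nat) (j : Int) (g : List (List (Option Char))) :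
    pvFall (↑(k + 1)) j g = pvFall (↑k) j (pvSet2 g (↑(k + 1)) j (pvGet2 g (↑k) j)) := by
  rw [pvFall, if_neg (by omega)]
  norm_num

theorem pvFall_goodA {m' n' : Nat} (k : Nat) (c : Int) {g : List (List (Option Char))}
    (hg : pvGoodA m' n' g) : pvGoodA m' n' (pvFall (↑k) c g) := by
  induction k generalizing g with
  | zero => simpa [pvFall_zero] using pvGoodA_set2 hg 0 c none
  | succ k ih => rw [pvFall_succ]; exact ih (pvGoodA_set2 hg _ c _)

theorem pvFall_get {m' n' : Nat} (k c : Nat) (g : List (List (Option Char)))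
    (hg : pvGoodA m' n' g) (hk : k < m') (hc : c < n') (r c' : Nat) (hr : r < m')
    (hc' : c' < n') :
    pvGet2 (pvFall (↑k) (↑c) g) (↑r) (↑c') =
      if c' = c then
        (if r = 0 then none
         else if r ≤ k then pvGet2 g (↑(r - 1)) (↑c') else pvGet2 g (↑r) (↑c'))
      else pvGet2 g (↑r) (↑c') := by
  induction k generalizing g with
  | zero =>
    have hcast : ((0 : Nat) : Int) = 0 := by norm_num
    rw [show ((0:Nat) : Int) = ((0:Nat) : Int) from rfl, hcast, pvFall_zero]
    have hm0 : 0 < m' := by omega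
    have hi : 0 < g.length := lt_of_lt_of_le hm0 hg.1
    have hj : c < (g.getD 0 []).length := lt_of_lt_of_le hc (pvRowLen hg hm0)
    have h := pvGet2_pvSet2 (g := g) (i := 0) (j := c) hi hj none r c'
    rw [hcast] at h
    rw [h]
    split_ifs <;> first | rfl | omega
  | succ k ih =>
    rw [pvFall_succ]
    have hi : k + 1 < g.length := lt_of_lt_of_le hk hg.1
    have hj : c < (g.getD (k + 1) []).length := lt_of_lt_of_le hc (pvRowLen hg hk)
    have hg' : pvGoodA m' n' (pvSet2 g (↑(k + 1)) (↑c) (pvGet2 g (↑k) (↑c))) :=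
      pvGoodA_set2 hg _ _ _
    rw [ih _ hg' (by omega)]
    have hset := pvGet2_pvSet2 (g := g) (i := k + 1) (j := c) hi hj (pvGet2 g (↑k) (↑c))
    by_cases hcc : c' = c
    · rw [if_pos hcc, if_pos hcc]
      by_cases hr0 : r = 0
      · rw [if_pos hr0, if_pos hr0]
      · rw [if_neg hr0, if_neg hr0]
        by_cases hrk : r ≤ k
        · rw [if_pos hrk, if_pos (by omega), hset, if_neg (by omega)]
        · rw [if_neg hrk]
          by_cases hrk1 : r ≤ k + 1
          · rw [if_pos hrk1, hset, if_pos ⟨by omega, hcc⟩, hcc]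
            congr 2
            omega
          · rw [if_neg hrk1, hset, if_neg (by omega)]
    · rw [if_neg hcc, if_neg hcc, hset, if_neg (by tauto)]

-- the column view of a fall, and of a sequence of falls
def pvRows (L : List (Int × Int)) (c : Nat) : List Nat :=
  (L.filter (fun p => p.2 == (c : Int))).map (fun p => p.1.toNat)

theorem length_pvWcol (m' : Nat) (g : List (List (Option Char))) (c : Nat) :
    (pvWcol m' g c).length = m' := by simp [pvWcol]

theorem getD_pvWcol {m' : Nat} (g : List (List (Option Char))) {c r : Nat} (hr : r < m') :
    (pvWcol m' g c).getD r none = pvGet2 g (↑r) (↑c) := by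
  rw [pvWcol]; exact PySem.List.getD_map_range _ _ _ _ hr

theorem pvDelAt_length {col : List (Option Char)} {k : Nat} (hk : k < col.length) :
    (pvDelAt col k).length = col.length := by
  simp [pvDelAt]
  omega

theorem pvWcol_fall_self {m' n' : Nat} (k c : Nat) (g : List (List (Option Char)))
    (hg : pvGoodA m' n' g) (hk : k < m') (hc : c < n') :
    pvWcol m' (pvFall (↑k) (↑c) g) c = pvDelAt (pvWcol m' g c) k := by
  apply List.ext_getElem
  · rw [length_pvWcol, pvDelAt_length (by rw [length_pvWcol]; exact hk), length_pvWcol]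
  intro r h1 h2
  rw [length_pvWcol] at h1
  have hval : (pvWcol m' (pvFall (↑k) (↑c) g) c)[r] = pvGet2 (pvFall (↑k) (↑c) g) (↑r) (↑c) := by
    simp only [pvWcol, List.getElem_map, List.getElem_range]
  rw [hval, pvFall_get k c g hg hk hc r c h1 hc, if_pos rfl]
  unfold pvDelAt
  rcases r with _ | r
  · simp
  · rw [List.getElem_cons_succ]
    by_cases hrk : r < k
    · rw [List.getElem_append_left (by simp [length_pvWcol]; omega)]
      rw [List.getElem_take, if_neg (by omega), if_pos (by omega)]
      simp only [pvWcol, List.getElem_map, List.getElem_range]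
      norm_num
    · have hlen : (List.take k (pvWcol m' g c)).length = k := by
        simp [length_pvWcol]; omega
      rw [List.getElem_append_right (by rw [hlen]; omega)]
      simp only [hlen]
      rw [List.getElem_drop, if_neg (by omega), if_neg (by omega)]
      simp only [pvWcol, List.getElem_map, List.getElem_range]
      congr 2
      omega

theorem pvWcol_fall_other {m' n' : Nat} (k c : Nat) (g : List (List (Option Char)))
    (hg : pvGoodA m' n' g) (hk : k < m') (hc : c < n') (c' : Nat) (hc' : c' < n')
    (hne : c' ≠ c) : pvWcol m' (pvFall (↑k) (↑c) g) c' = pvWcol m' g c' := by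
  apply List.ext_getElem (by rw [length_pvWcol, length_pvWcol])
  intro r hr1 hr2
  rw [length_pvWcol] at hr1
  simp only [pvWcol, List.getElem_map, List.getElem_range]
  rw [pvFall_get k c g hg hk hc r c' hr1 hc', if_neg hne]

theorem pvFoldFall {m' n' : Nat} (L : List (Int × Int))
    (hL : ∀ p ∈ L, 0 ≤ p.1 ∧ p.1 < (m' : Int) ∧ 0 ≤ p.2 ∧ p.2 < (n' : Int))
    (g : List (List (Option Char))) (hg : pvGoodA m' n' g) :
    pvGoodA m' n' (L.foldl (fun b p => pvFall p.1 p.2 b) g) ∧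
      ∀ c < n', pvWcol m' (L.foldl (fun b p => pvFall p.1 p.2 b) g) c =
        (pvRows L c).foldl pvDelAt (pvWcol m' g c) := by
  induction L generalizing g with
  | nil => exact ⟨hg, fun c _ => rfl⟩
  | cons p L ih =>
    obtain ⟨hp1, hp2, hp3, hp4⟩ := hL p (by simp)
    have hk : p.1 = ((p.1.toNat : Nat) : Int) := by omega
    have hc : p.2 = ((p.2.toNat : Nat) : Int) := by omega
    have hkm : p.1.toNat < m' := by omega
    have hcn : p.2.toNat < n' := by omega
    have hg1 : pvGoodA m' n' (pvFall p.1 p.2 g) := by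
      rw [hk, hc]; exact pvFall_goodA _ _ hg
    obtain ⟨ihA, ihW⟩ := ih (fun q hq => hL q (by simp [hq])) (pvFall p.1 p.2 g) hg1
    refine ⟨by simpa using ihA, ?_⟩
    intro c hcn'
    have hfold : (p :: L).foldl (fun b p => pvFall p.1 p.2 b) g =
        L.foldl (fun b p => pvFall p.1 p.2 b) (pvFall p.1 p.2 g) := rfl
    rw [hfold, ihW c hcn']
    by_cases hcc : p.2.toNat = c
    · have : pvRows (p :: L) c = p.1.toNat :: pvRows L c := by
        simp [pvRows, List.filter_cons, show p.2 == (c : Int) from by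
          simp [beq_iff_eq]; omega]
      rw [this]
      simp only [List.foldl_cons]
      congr 1
      rw [hk, hc, show ((p.2.toNat : Nat) : Int) = ((c : Nat) : Int) by omega]
      exact pvWcol_fall_self p.1.toNat c g hg hkm hcn'
    · have : pvRows (p :: L) c = pvRows L c := by
        simp [pvRows, List.filter_cons, show (p.2 == (c : Int)) = false from by
          simp [beq_iff_eq]; omega]
      rw [this]
      congr 1
      rw [hk, hc]
      exact pvWcol_fall_other p.1.toNat p.2.toNat g hg hkm hcn c hcn' (Ne.symm hcc)

-- folding pvDelAt over an increasing list of indices = pad with zeros ++ survivors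
theorem foldl_pvDelAt_append_last (F : List Nat) (col : List (Option Char))
    (x : Option Char) (h : ∀ k ∈ F, k < col.length) :
    F.foldl pvDelAt (col ++ [x]) = (F.foldl pvDelAt col) ++ [x] := by
  induction F generalizing col with
  | nil => rfl
  | cons a F ih =>
    have ha : a < col.length := h a (by simp)
    simp only [List.foldl_cons]
    have hstep : pvDelAt (col ++ [x]) a = pvDelAt col a ++ [x] := by
      unfold pvDelAt
      rw [List.take_append_of_le_length (by omega), List.drop_append_of_le_length (by omega)]
      simp
    rw [hstep, ih _ (fun k hk => by rw [pvDelAt_length ha]; exact h k (by simp [hk]))]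

theorem foldl_pvDelAt_eq (P : Nat → Bool) (col : List (Option Char)) :
    ((List.range col.length).filter P).foldl pvDelAt col =
      List.replicate ((List.range col.length).filter P).length none ++
        ((List.range col.length).filter (fun i => !P i)).map (fun i => col.getD i none) := by
  induction col using List.reverseRecOn with
  | nil => simp
  | append_singleton col x ih =>
    have hlen : (col ++ [x]).length = col.length + 1 := by simp
    rw [hlen, List.range_succ, List.filter_append, List.filter_append, List.foldl_append]
    have hmemF : ∀ k ∈ (List.range col.length).filter P, k < col.length := by
      intro k hk; simp at hk; exact hk.1.trans_le (le_refl _) |>.trans_le (le_refl _) |> id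
    have hbase : ((List.range col.length).filter P).foldl pvDelAt (col ++ [x]) =
        (List.replicate ((List.range col.length).filter P).length none ++
          ((List.range col.length).filter (fun i => !P i)).map (fun i => col.getD i none)) ++ [x] := by
      rw [foldl_pvDelAt_append_last _ _ _ hmemF, ih]
    set K := ((List.range col.length).filter P).length with hK
    set Neg := ((List.range col.length).filter (fun i => !P i)).map (fun i => col.getD i none)
      with hNeg
    have hKNeg : K + Neg.length = col.length := by
      rw [hK, hNeg, List.length_map]
      have := List.length_eq_length_filter_add (l := List.range col.length) P
      simp at this
      omega
    have hmapx : ((List.range col.length).filter (fun i => !P i)).map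
        (fun i => (col ++ [x]).getD i none) = Neg := by
      rw [hNeg]
      apply List.map_congr_left
      intro k hk
      have hkl : k < col.length := by simp at hk; exact hk.1
      rw [List.getD_eq_getElem?_getD, List.getD_eq_getElem?_getD,
        List.getElem?_append_left hkl]
    by_cases hP : P col.length
    · rw [hbase]
      rw [show ([col.length].filter P) = [col.length] from by simp [hP],
        show ([col.length].filter (fun i => !P i)) = [] from by simp [hP]]
      simp only [List.foldl_cons, List.foldl_nil, List.append_nil]
      have hstep : pvDelAt ((List.replicate K none ++ Neg) ++ [x]) col.length =
          List.replicate (K + 1) none ++ Neg := by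
        unfold pvDelAt
        have hlen2 : (List.replicate K none ++ Neg).length = col.length := by
          simp [hKNeg]
        rw [List.take_append_of_le_length (by rw [hlen2]),
          List.take_of_length_le (by rw [hlen2])]
        rw [List.drop_of_length_le (by simp only [List.length_append, hlen2, List.length_cons, List.length_nil]; omega)]
        simp [List.replicate_succ]
      rw [hstep, hmapx]
      congr 1
      rw [List.length_append]
      simp [hK]
    · have hPf : P col.length = false := by simpa using hP
      rw [hbase]
      rw [show ([col.length].filter P) = [] from by simp [hPf]]
      rw [show ([col.length].filter (fun i => !P i)) = [col.length] from by simp [hPf]]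
      simp only [List.foldl_nil, List.filter_append, List.map_append]
      rw [hmapx]
      have hx : ([col.length].map (fun i => (col ++ [x]).getD i none)) = [x] := by
        simp [List.getD_eq_getElem?_getD, List.getElem?_append_right (le_refl col.length)]
      rw [hx]
      rw [List.append_assoc]
      congr 2
      · simp [hK]

-- bounds of the scanned positions
theorem pvScanA_bounds (m n : Int) (g : List (List (Option Char))) :
    ∀ p ∈ pvScanA m n g, 0 ≤ p.1 ∧ p.1 < m ∧ 0 ≤ p.2 ∧ p.2 < n := by
  unfold pvScanA
  have hinner : ∀ (i : Int), 0 ≤ i → i + 1 < m → ∀ (lj : List Int),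
      (∀ j ∈ lj, 0 ≤ j ∧ j + 1 < n) → ∀ (q : List (Int × Int)),
      (∀ p ∈ q, 0 ≤ p.1 ∧ p.1 < m ∧ 0 ≤ p.2 ∧ p.2 < n) →
      ∀ p ∈ lj.foldl (fun q j =>
        let b1 := pvGet2 g i j
        let b2 := pvGet2 g i (j + 1)
        let b3 := pvGet2 g (i + 1) j
        let b4 := pvGet2 g (i + 1) (j + 1)
        if b1 = b2 ∧ b2 = b3 ∧ b3 = b4 ∧ b1 ≠ none then
          q ++ [(i, j), (i, j + 1), (i + 1, j), (i + 1, j + 1)]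
        else q) q, 0 ≤ p.1 ∧ p.1 < m ∧ 0 ≤ p.2 ∧ p.2 < n := by
    intro i hi0 hiM lj
    induction lj with
    | nil => intro _ q hq; simpa using hq
    | cons j lj ih =>
      intro hlj q hq
      simp only [List.foldl_cons]
      obtain ⟨hj0, hjN⟩ := hlj j (by simp)
      apply ih (fun x hx => hlj x (by simp [hx]))
      intro p hp
      simp only [] at hp
      split_ifs at hp with hcond
      · rw [List.mem_append] at hp
        rcases hp with hp | hp
        · exact hq p hp
        · fin_cases hp <;> simp <;> omega
      · exact hq p hp
  have houter : ∀ (li : List Int), (∀ i ∈ li, 0 ≤ i ∧ i + 1 < m) →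
      ∀ (q : List (Int × Int)), (∀ p ∈ q, 0 ≤ p.1 ∧ p.1 < m ∧ 0 ≤ p.2 ∧ p.2 < n) →
      ∀ p ∈ li.foldl (fun q i => (PySem.List.pyRange 0 (n - 1) 1).foldl (fun q j =>
        let b1 := pvGet2 g i j
        let b2 := pvGet2 g i (j + 1)
        let b3 := pvGet2 g (i + 1) j
        let b4 := pvGet2 g (i + 1) (j + 1)
        if b1 = b2 ∧ b2 = b3 ∧ b3 = b4 ∧ b1 ≠ none then
          q ++ [(i, j), (i, j + 1), (i + 1, j), (i + 1, j + 1)]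
        else q) q) q, 0 ≤ p.1 ∧ p.1 < m ∧ 0 ≤ p.2 ∧ p.2 < n := by
    intro li
    induction li with
    | nil => intro _ q hq; simpa using hq
    | cons i li ih =>
      intro hli q hq
      simp only [List.foldl_cons]
      apply ih (fun x hx => hli x (by simp [hx]))
      exact hinner i (hli i (by simp)).1 (hli i (by simp)).2 _
        (fun j hj => by have := (PySem.List.mem_pyRange_one).1 hj; omega) q hq
  exact houter _ (fun i hi => by have := (PySem.List.mem_pyRange_one).1 hi; omega) [] (by simp)

-- the two scans agree: B's set is exactly set(queue)
theorem pvScanInner_eq {M N : Int} (g cols : List (List (Option Char)))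
    (hW : ∀ i j : Int, 0 ≤ i → i < M → 0 ≤ j → j < N → pvGet2 g i j = pvGet2 cols j i)
    (i : Int) (hi : 0 ≤ i ∧ i + 1 < M) (lj : List Int)
    (hlj : ∀ j ∈ lj, 0 ≤ j ∧ j + 1 < N) (q : List (Int × Int)) (s : PySem.Set (Int × Int))
    (hs : s = PySem.Set.ofList q) :
    lj.foldl (fun s j =>
      let b := pvGet2 cols j i
      if b ≠ none ∧ b = pvGet2 cols (j + 1) i ∧
          pvGet2 cols (j + 1) i = pvGet2 cols j (i + 1) ∧
          pvGet2 cols j (i + 1) = pvGet2 cols (j + 1) (i + 1) then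
        PySem.Set.update s [(i, j), (i, j + 1), (i + 1, j), (i + 1, j + 1)]
      else s) s =
    PySem.Set.ofList (lj.foldl (fun q j =>
      let b1 := pvGet2 g i j
      let b2 := pvGet2 g i (j + 1)
      let b3 := pvGet2 g (i + 1) j
      let b4 := pvGet2 g (i + 1) (j + 1)
      if b1 = b2 ∧ b2 = b3 ∧ b3 = b4 ∧ b1 ≠ none then
        q ++ [(i, j), (i, j + 1), (i + 1, j), (i + 1, j + 1)]
      else q) q) := by
  induction lj generalizing q s with
  | nil => simpa using hs
  | cons j lj ih =>
    obtain ⟨hj0, hjN⟩ := hlj j (by simp)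
    have e1 : pvGet2 g i j = pvGet2 cols j i := hW i j hi.1 (by omega) hj0 (by omega)
    have e2 : pvGet2 g i (j + 1) = pvGet2 cols (j + 1) i :=
      hW i (j + 1) hi.1 (by omega) (by omega) (by omega)
    have e3 : pvGet2 g (i + 1) j = pvGet2 cols j (i + 1) :=
      hW (i + 1) j (by omega) (by omega) hj0 (by omega)
    have e4 : pvGet2 g (i + 1) (j + 1) = pvGet2 cols (j + 1) (i + 1) :=
      hW (i + 1) (j + 1) (by omega) (by omega) (by omega) (by omega)
    simp only [List.foldl_cons]
    apply ih (fun j hj => hlj j (by simp [hj]))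
    simp only [e1, e2, e3, e4] at *
    by_cases hcond : pvGet2 cols j i = pvGet2 cols (j + 1) i ∧
        pvGet2 cols (j + 1) i = pvGet2 cols j (i + 1) ∧
        pvGet2 cols j (i + 1) = pvGet2 cols (j + 1) (i + 1) ∧
        pvGet2 cols j i ≠ none
    · rw [if_pos hcond, if_pos ⟨hcond.2.2.2, hcond.1, hcond.2.1, hcond.2.2.1⟩, hs,
        PySem.Set.ofList_append]
    · rw [if_neg hcond, if_neg (by tauto), hs]

theorem pvScan_eq {M N : Int} (g cols : List (List (Option Char)))
    (hW : ∀ i j : Int, 0 ≤ i → i < M → 0 ≤ j → j < N → pvGet2 g i j = pvGet2 cols j i) :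
    pvScanB M N cols = PySem.Set.ofList (pvScanA M N g) := by
  unfold pvScanA pvScanB
  have hmain : ∀ (li : List Int), (∀ i ∈ li, 0 ≤ i ∧ i + 1 < M) →
      ∀ (q : List (Int × Int)) (s : PySem.Set (Int × Int)), s = PySem.Set.ofList q →
      li.foldl (fun s i => (PySem.List.pyRange 0 (N - 1) 1).foldl (fun s j =>
        let b := pvGet2 cols j i
        if b ≠ none ∧ b = pvGet2 cols (j + 1) i ∧
            pvGet2 cols (j + 1) i = pvGet2 cols j (i + 1) ∧
            pvGet2 cols j (i + 1) = pvGet2 cols (j + 1) (i + 1) then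
          PySem.Set.update s [(i, j), (i, j + 1), (i + 1, j), (i + 1, j + 1)]
        else s) s) s =
      PySem.Set.ofList (li.foldl (fun q i => (PySem.List.pyRange 0 (N - 1) 1).foldl (fun q j =>
        let b1 := pvGet2 g i j
        let b2 := pvGet2 g i (j + 1)
        let b3 := pvGet2 g (i + 1) j
        let b4 := pvGet2 g (i + 1) (j + 1)
        if b1 = b2 ∧ b2 = b3 ∧ b3 = b4 ∧ b1 ≠ none then
          q ++ [(i, j), (i, j + 1), (i + 1, j), (i + 1, j + 1)]
        else q) q) q) := by
    intro li hli
    induction li with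
    | nil => intro q s hs; simpa using hs
    | cons i li ih =>
      intro q s hs
      simp only [List.foldl_cons]
      apply ih (fun x hx => hli x (by simp [hx]))
      exact pvScanInner_eq g cols hW i (hli i (by simp)) _
        (fun j hj => by have := (PySem.List.mem_pyRange_one).1 hj; omega) q s hs
  apply hmain
  · intro i hi
    have := (PySem.List.mem_pyRange_one).1 hi
    omega
  · rfl

-- B's gravity acts column-wise
def pvNewCol (m : Int) (S : PySem.Set (Int × Int)) (col : List (Option Char)) (j : Int) :
    List (Option Char) :=
  let surv := ((PySem.List.pyRange 0 m 1).filter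
    (fun i => !(PySem.Set.contains S (i, j)))).map (fun i => col.getD i.toNat none)
  List.replicate (m - (surv.length : Int)).toNat none ++ surv

def pvGStep (m : Int) (S : PySem.Set (Int × Int)) (cs : List (List (Option Char)))
    (j : Int) : List (List (Option Char)) :=
  cs.set j.toNat (pvNewCol m S (cs.getD j.toNat []) j)

theorem pvGravity_eq (m n : Int) (S : PySem.Set (Int × Int))
    (cols : List (List (Option Char))) :
    pvGravity m n S cols = (PySem.List.pyRange 0 n 1).foldl (pvGStep m S) cols := rfl

theorem pvGravity_aux (m n : Int) (S : PySem.Set (Int × Int)) :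
    ∀ (k : Nat) (a : Int), 0 ≤ a → (n - a).toNat = k →
    ∀ (cs : List (List (Option Char))) (c : Nat),
      ((PySem.List.pyRange a n 1).foldl (pvGStep m S) cs).getD c [] =
      if a ≤ (c : Int) ∧ (c : Int) < n ∧ c < cs.length then pvNewCol m S (cs.getD c []) (c : Int)
      else cs.getD c [] := by
  intro k
  induction k with
  | zero =>
    intro a ha hk cs c
    rw [show PySem.List.pyRange a n 1 = [] from PySem.List.pyRange_one_eq_nil (by omega)]
    rw [List.foldl_nil, if_neg (by omega)]
  | succ k ih =>
    intro a ha hk cs c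
    rw [show PySem.List.pyRange a n 1 = a :: PySem.List.pyRange (a + 1) n 1 from
      PySem.List.pyRange_one_cons (by omega)]
    rw [List.foldl_cons, ih (a + 1) (by omega) (by omega)]
    unfold pvGStep
    by_cases hc : c = a.toNat
    · subst hc
      by_cases hlen : a.toNat < cs.length
      · rw [if_neg (by omega), if_pos ⟨by omega, by omega, hlen⟩]
        rw [List.getD_eq_getElem?_getD, List.getElem?_set_self hlen]
        simp only [Option.getD_some]
        congr 1
        omega
      · rw [if_neg (by rw [List.length_set]; omega), if_neg (by omega)]
        rw [List.getD_eq_getElem?_getD, List.getD_eq_getElem?_getD, List.getElem?_set]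
        rw [if_pos rfl, if_neg hlen]
        rw [List.getElem?_eq_none (by omega)]
    · have hget : (cs.set a.toNat (pvNewCol m S (cs.getD a.toNat []) a)).getD c [] =
          cs.getD c [] := by
        rw [List.getD_eq_getElem?_getD, List.getElem?_set_ne (by omega),
          ← List.getD_eq_getElem?_getD]
      rw [List.length_set]
      by_cases hcond : a + 1 ≤ (c : Int) ∧ (c : Int) < n ∧ c < cs.length
      · rw [if_pos hcond, if_pos ⟨by omega, hcond.2.1, hcond.2.2⟩, hget]
      · rw [if_neg hcond, if_neg (by omega), hget]

theorem pvGravity_getD (m n : Int) (S : PySem.Set (Int × Int))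
    (cols : List (List (Option Char))) (c : Nat) (hc : (c : Int) < n)
    (hlen : c < cols.length) :
    (pvGravity m n S cols).getD c [] = pvNewCol m S (cols.getD c []) (c : Int) := by
  rw [pvGravity_eq, pvGravity_aux m n S (n - 0).toNat 0 (by omega) (by omega) cols c,
    if_pos ⟨by omega, hc, hlen⟩]

theorem pvGravity_length (m n : Int) (S : PySem.Set (Int × Int))
    (cols : List (List (Option Char))) :
    (pvGravity m n S cols).length = cols.length := by
  rw [pvGravity_eq]
  induction PySem.List.pyRange 0 n 1 generalizing cols with
  | nil => rfl
  | cons a l ih => rw [List.foldl_cons, ih]; simp [pvGStep]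

-- the row-sorted removal list, per column, is `range` filtered by membership
theorem pvRows_sorted {m' n' : Nat} (T : List (Int × Int)) (hnd : T.Nodup)
    (hb : ∀ p ∈ T, 0 ≤ p.1 ∧ p.1 < (m' : Int) ∧ 0 ≤ p.2 ∧ p.2 < (n' : Int)) (c : Nat) :
    pvRows (PySem.List.sorted T (fun p => p.1)) c =
      (List.range m').filter (fun i : Nat => PySem.Set.contains T ((i : Int), (c : Int))) := by
  set L := PySem.List.sorted T (fun p => p.1) with hL
  have hperm : L.Perm T := PySem.List.sorted_perm T _ false
  have hndL : L.Nodup := hperm.nodup_iff.2 hnd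
  have hple : L.Pairwise (fun a b => a.1 ≤ b.1) := PySem.List.sorted_pairwise T _
  have hfilter : (L.filter (fun p => p.2 == (c : Int))).Pairwise
      (fun a b => a.1.toNat < b.1.toNat) := by
    have h1 : L.Pairwise (fun a b => a.1 ≤ b.1 ∧ a ≠ b) := hple.and hndL
    have h2 := h1.filter (fun p => p.2 == (c : Int))
    refine h2.imp_of_mem ?_
    intro a b ha hb2 hab
    have hac : a.2 = (c : Int) := by
      have := (List.mem_filter.1 ha).2; simpa [beq_iff_eq] using this
    have hbc : b.2 = (c : Int) := by
      have := (List.mem_filter.1 hb2).2; simpa [beq_iff_eq] using this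
    have haT := hb a (hperm.subset (List.mem_filter.1 ha).1)
    have hbT := hb b (hperm.subset (List.mem_filter.1 hb2).1)
    have hne : a.1 ≠ b.1 := by
      intro h
      exact hab.2 (Prod.ext h (hac.trans hbc.symm))
    omega
  have hpairA : (pvRows L c).Pairwise (· < ·) := by
    rw [pvRows]
    exact List.Pairwise.map _ (fun a b h => h) hfilter
  have hndA : (pvRows L c).Nodup := hpairA.imp (fun h => Nat.ne_of_lt h)
  have hpairB : ((List.range m').filter
      (fun i : Nat => PySem.Set.contains T ((i : Int), (c : Int)))).Pairwise (· < ·) :=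
    List.pairwise_lt_range.filter _
  have hndB := hpairB.imp (fun h => Nat.ne_of_lt h)
  have hmem : ∀ x, x ∈ pvRows L c ↔
      x ∈ (List.range m').filter (fun i : Nat => PySem.Set.contains T ((i : Int), (c : Int))) := by
    intro x
    simp only [pvRows, List.mem_map, List.mem_filter, List.mem_range, beq_iff_eq,
      PySem.Set.contains_iff]
    constructor
    · rintro ⟨p, ⟨hpL, hpc⟩, rfl⟩
      have hpT := hperm.subset hpL
      have hbp := hb p hpT
      have hpx : p = (((p.1.toNat : Nat) : Int), (c : Int)) := by
        obtain ⟨p1, p2⟩ := p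
        simp only [Prod.mk.injEq]
        simp only at hpc hbp
        exact ⟨by omega, hpc⟩
      exact ⟨by omega, by rw [← hpx]; exact hpT⟩
    · rintro ⟨hx, hmemT⟩
      exact ⟨((x : Int), (c : Int)), ⟨hperm.mem_iff.2 hmemT, rfl⟩, by simp⟩
  exact List.eq_of_perm_of_sorted (fun a b _ _ h1 h2 => by omega) hpairA hpairB
    ((List.perm_ext_iff_of_nodup hndA hndB).2 hmem)

-- A's inner while-loop: answer grows by the number of removed cells
theorem pvFoldPair (L : List (Int × Int)) (ans : Int) (g : List (List (Option Char))) :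
    L.foldl (fun (p : Int × List (List (Option Char))) pos =>
        (p.1 + 1, pvFall pos.1 pos.2 p.2)) (ans, g) =
      (ans + L.length, L.foldl (fun b pos => pvFall pos.1 pos.2 b) g) := by
  induction L generalizing ans g with
  | nil => simp
  | cons p L ih =>
    simp only [List.foldl_cons, ih]
    simp only [List.length_cons, Prod.mk.injEq]
    exact ⟨by push_cast; ring, trivial⟩

theorem pvNewCol_length (m' : Nat) (S : PySem.Set (Int × Int)) (col : List (Option Char))
    (j : Int) : (pvNewCol (↑m') S col j).length = m' := by
  unfold pvNewCol
  have hs : (((PySem.List.pyRange 0 (↑m') 1).filter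
      (fun i => !(PySem.Set.contains S (i, j)))).map (fun i => col.getD i.toNat none)).length ≤ m' := by
    rw [List.length_map]
    calc ((PySem.List.pyRange 0 (↑m') 1).filter _).length
        ≤ (PySem.List.pyRange 0 (↑m') 1).length := List.length_filter_le _ _
      _ = m' := by rw [PySem.List.length_pyRange_one]; omega
  simp only [List.length_append, List.length_replicate]
  omega

theorem pvWEq_int {m' n' : Nat} {g cols : List (List (Option Char))}
    (hW : pvWEq m' n' g cols) : ∀ i j : Int, 0 ≤ i → i < (m' : Int) → 0 ≤ j →
      j < (n' : Int) → pvGet2 g i j = pvGet2 cols j i := by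
  intro i j h1 h2 h3 h4
  have hi : i = ((i.toNat : Nat) : Int) := by omega
  have hj : j = ((j.toNat : Nat) : Int) := by omega
  rw [hi, hj]
  exact hW i.toNat (by omega) j.toNat (by omega)

theorem pvStepLemma {m' n' : Nat} (hm : 2 ≤ m') (hn : 2 ≤ n')
    (g cols : List (List (Option Char))) (hA : pvGoodA m' n' g) (hB : pvGoodB m' n' cols)
    (hW : pvWEq m' n' g cols) :
    pvGoodA m' n' ((PySem.List.sorted (pvScanB (↑m') (↑n') cols) (fun p => p.1)).foldl
        (fun b pos => pvFall pos.1 pos.2 b) g) ∧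
    pvGoodB m' n' (pvGravity (↑m') (↑n') (pvScanB (↑m') (↑n') cols) cols) ∧
    pvWEq m' n' ((PySem.List.sorted (pvScanB (↑m') (↑n') cols) (fun p => p.1)).foldl
        (fun b pos => pvFall pos.1 pos.2 b) g)
      (pvGravity (↑m') (↑n') (pvScanB (↑m') (↑n') cols) cols) := by
  have hW' := pvWEq_int hW
  set T := pvScanB (↑m' : Int) (↑n') cols with hT
  have hscan : T = PySem.Set.ofList (pvScanA (↑m') (↑n') g) := pvScan_eq g cols hW'
  have hTb : ∀ p ∈ T, 0 ≤ p.1 ∧ p.1 < (m' : Int) ∧ 0 ≤ p.2 ∧ p.2 < (n' : Int) := by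
    intro p hp
    rw [hscan] at hp
    exact pvScanA_bounds (↑m') (↑n') g p ((PySem.Set.mem_ofList _ _).1 hp)
  have hTnd : T.Nodup := by rw [hscan]; exact PySem.Set.nodup_ofList _
  set q3 := PySem.List.sorted T (fun p => p.1) with hq3
  have hq3b : ∀ p ∈ q3, 0 ≤ p.1 ∧ p.1 < (m' : Int) ∧ 0 ≤ p.2 ∧ p.2 < (n' : Int) := by
    intro p hp
    exact hTb p ((PySem.List.sorted_perm T _ false).subset hp)
  obtain ⟨hA', hwcol⟩ := pvFoldFall q3 hq3b g hA
  set g' := q3.foldl (fun b pos => pvFall pos.1 pos.2 b) g with hg'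
  set cols' := pvGravity (↑m' : Int) (↑n') T cols with hcols'
  have hcolsLen : cols.length = n' := hB.1
  have hB' : pvGoodB m' n' cols' := by
    constructor
    · rw [hcols', pvGravity_length, hcolsLen]
    · intro col hcol
      obtain ⟨c, hc, rfl⟩ := List.mem_iff_getElem.1 hcol
      have hcn : c < n' := by
        rw [hcols', pvGravity_length, hcolsLen] at hc
        exact hc
      have := pvGravity_getD (↑m') (↑n') T cols c (by omega) (by omega)
      rw [← hcols'] at this
      rw [List.getD_eq_getElem?_getD, List.getElem?_eq_getElem hc] at this
      simp only [Option.getD_some] at this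
      rw [this]
      exact pvNewCol_length m' T _ _
  refine ⟨hA', hB', ?_⟩
  intro r hr c hc
  -- A side: the column of g' is the delAt-fold of the old column
  have hAcol : pvWcol m' g' c =
      List.replicate (((List.range m').filter
          (fun i : Nat => PySem.Set.contains T ((i : Int), (c : Int)))).length) none ++
        ((List.range m').filter (fun i : Nat =>
            !(PySem.Set.contains T ((i : Int), (c : Int))))).map
          (fun i => (pvWcol m' g c).getD i none) := by
    rw [hwcol c hc, pvRows_sorted (m' := m') (n' := n') T hTnd hTb c]
    have := foldl_pvDelAt_eq (fun i : Nat => PySem.Set.contains T ((i : Int), (c : Int)))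
      (pvWcol m' g c)
    rw [length_pvWcol] at this
    exact this
  -- B side: the new column is pvNewCol of dead cells
  have hBcol : cols'.getD c [] = pvNewCol (↑m') T (cols.getD c []) (↑c) := by
    rw [hcols']
    exact pvGravity_getD (↑m') (↑n') T cols c (by omega) (by omega)
  -- the survivor lists coincide
  have hsurv : ((PySem.List.pyRange 0 (↑m') 1).filter
        (fun i => !(PySem.Set.contains T (i, (c : Int))))).map
        (fun i => (cols.getD c []).getD i.toNat none) =
      ((List.range m').filter (fun i : Nat =>
          !(PySem.Set.contains T ((i : Int), (c : Int))))).map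
        (fun i => (pvWcol m' g c).getD i none) := by
    rw [PySem.List.pyRange_one]
    have hn0 : ((↑m' : Int) - 0).toNat = m' := by omega
    rw [hn0, List.filter_map, List.map_map]
    simp only [Function.comp, zero_add, Int.toNat_natCast]
    apply List.map_congr_left
    intro k hk
    have hkm : k < m' := List.mem_range.1 (List.mem_filter.1 hk).1
    rw [getD_pvWcol (m' := m') g hkm, hW k hkm c hc]
    simp [pvGet2]
  have hfinal : cols'.getD c [] = pvWcol m' g' c := by
    rw [hBcol]
    simp only [pvNewCol]
    rw [hsurv, hAcol]
    congr 2
    simp only [List.length_map]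
    have hsplit := List.length_eq_length_filter_add (l := List.range m')
      (fun i : Nat => PySem.Set.contains T ((i : Int), (c : Int)))
    rw [List.length_range] at hsplit
    omega
  calc pvGet2 g' (↑r) (↑c) = (pvWcol m' g' c).getD r none := (getD_pvWcol g' hr).symm
    _ = (cols'.getD c []).getD r none := by rw [hfinal]
    _ = pvGet2 cols' (↑c) (↑r) := by simp [pvGet2]

theorem pvOfList_len_zero (q : List (Int × Int)) :
    ((PySem.Set.ofList q).length = 0 ↔ q.length = 0) := by
  cases q with
  | nil => simp
  | cons x q => rw [PySem.Set.ofList_cons]; simp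

theorem pvLoop_eq {m' n' : Nat} (hm : 2 ≤ m') (hn : 2 ≤ n') :
    ∀ (fuel : Nat) (g cols : List (List (Option Char))) (ans : Int),
      pvGoodA m' n' g → pvGoodB m' n' cols → pvWEq m' n' g cols →
      pvLoopA (↑m') (↑n') fuel g ans = pvLoopB (↑m') (↑n') fuel cols ans := by
  intro fuel
  induction fuel with
  | zero => intro g cols ans _ _ _; rfl
  | succ fuel ih =>
    intro g cols ans hA hB hW
    have hscan : pvScanB (↑m') (↑n') cols = PySem.Set.ofList (pvScanA (↑m') (↑n') g) :=
      pvScan_eq g cols (pvWEq_int hW)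
    simp only [pvLoopA, pvLoopB]
    by_cases hq : (pvScanA (↑m') (↑n') g).length = 0
    · rw [if_pos hq, if_pos (by rw [hscan]; exact (pvOfList_len_zero _).2 hq)]
    · rw [if_neg hq, if_neg (by rw [hscan]; intro h; exact hq ((pvOfList_len_zero _).1 h))]
      rw [pvFoldPair]
      obtain ⟨hA', hB', hW'⟩ := pvStepLemma hm hn g cols hA hB hW
      rw [hscan] at hA' hB' hW' ⊢
      have hlen : ((PySem.List.sorted (PySem.Set.ofList (pvScanA (↑m') (↑n') g))
          (fun p => p.1)).length : Int) =
          ((PySem.Set.ofList (pvScanA (↑m') (↑n') g)).length : Int) := by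
        rw [PySem.List.length_sorted]
      simp only []
      rw [hlen]
      exact ih _ _ _ hA' hB' hW'

theorem pvScanA_trivial (m n : Int) (h : m ≤ 1 ∨ n ≤ 1) (g : List (List (Option Char))) :
    pvScanA m n g = [] := by
  unfold pvScanA
  rcases h with h | h
  · rw [show PySem.List.pyRange 0 (m - 1) 1 = [] from
      PySem.List.pyRange_one_eq_nil (by omega)]
    rfl
  · rw [show PySem.List.pyRange 0 (n - 1) 1 = [] from
      PySem.List.pyRange_one_eq_nil (by omega)]
    simp only [List.foldl_nil, List.foldl_fixed]

theorem pvInit (m n : Int) (board : List String) (hm : 2 ≤ m) (hn : 2 ≤ n)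
    (hlen : m ≤ (board.length : Int)) (hrows : ∀ s ∈ board.take m.toNat, n ≤ (s.length : Int)) :
    pvGoodA m.toNat n.toNat (board.map (fun s => s.toList.map some)) ∧
    pvGoodB m.toNat n.toNat ((PySem.List.pyRange 0 n 1).map (fun j =>
      (PySem.List.pyRange 0 m 1).map (fun i =>
        (some (((board.getD i.toNat "").toList).getD j.toNat ' ') : Option Char)))) ∧
    pvWEq m.toNat n.toNat (board.map (fun s => s.toList.map some))
      ((PySem.List.pyRange 0 n 1).map (fun j =>
        (PySem.List.pyRange 0 m 1).map (fun i =>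
          (some (((board.getD i.toNat "").toList).getD j.toNat ' ') : Option Char)))) := by
  have hrow : ∀ r : Nat, r < m.toNat → n.toNat ≤ (board.getD r "").length := by
    intro r hr
    have hrb : r < board.length := by omega
    have hmem : board[r] ∈ board.take m.toNat := by
      rw [List.mem_take_iff_getElem]; exact ⟨r, by omega, by simp⟩
    have := hrows _ hmem
    rw [List.getD_eq_getElem?_getD, List.getElem?_eq_getElem hrb]
    simpa using (by omega : n.toNat ≤ board[r].length)
  have hg0 : ∀ r : Nat, r < m.toNat →
      (board.map (fun s => s.toList.map some)).getD r [] =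
        (board.getD r "").toList.map some := by
    intro r hr
    have hrb : r < board.length := by omega
    rw [List.getD_eq_getElem?_getD, List.getElem?_map, List.getElem?_eq_getElem hrb]
    simp [List.getD_eq_getElem?_getD, List.getElem?_eq_getElem hrb]
  refine ⟨⟨by simp; omega, ?_⟩, ⟨?_, ?_⟩, ?_⟩
  · intro r hrmem
    rw [List.mem_take_iff_getElem] at hrmem
    obtain ⟨k, hk, rfl⟩ := hrmem
    simp only [List.length_map] at hk
    have hkm : k < m.toNat := by omega
    have hkb : k < board.length := by omega
    have := hrow k hkm
    simp only [List.getElem_map]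
    rw [List.length_map, String.length_toList]
    rw [List.getD_eq_getElem?_getD, List.getElem?_eq_getElem hkb] at this
    simpa using this
  · rw [List.length_map, PySem.List.length_pyRange_one]; omega
  · intro col hcol
    rw [List.mem_map] at hcol
    obtain ⟨j, _, rfl⟩ := hcol
    rw [List.length_map, PySem.List.length_pyRange_one]; omega
  · intro r hr c hc
    have hpyn : PySem.List.pyRange 0 n 1 = (List.range n.toNat).map (fun k : Nat => (k : Int)) := by
      rw [PySem.List.pyRange_one]; simp
    have hpym : PySem.List.pyRange 0 m 1 = (List.range m.toNat).map (fun k : Nat => (k : Int)) := by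
      rw [PySem.List.pyRange_one]; simp
    have hget : ∀ {β : Type} (f : Int → β) (N c : Nat) (d : β), c < N →
        (((List.range N).map (fun k : Nat => (k : Int))).map f).getD c d = f (c : Int) := by
      intro β f N c d hcN
      rw [List.map_map, List.getD_eq_getElem?_getD, List.getElem?_map,
        List.getElem?_range hcN]
      simp
    rw [pvGet2_natCast, hg0 r hr]
    simp only [pvGet2, Int.toNat_natCast]
    rw [hpyn, hget _ n.toNat c [] hc, hpym, hget _ m.toNat r none hr]
    simp only [Int.toNat_natCast]
    have hcl : c < (board.getD r "").toList.length := by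
      rw [String.length_toList]
      have := hrow r hr
      omega
    have hcl' : c < (board[r]?.getD "").toList.length := by
      simpa [List.getD_eq_getElem?_getD] using hcl
    rw [List.getD_eq_getElem?_getD, List.getD_eq_getElem?_getD, List.getElem?_map,
      List.getElem?_eq_getElem hcl']
    simp [List.getD_eq_getElem?_getD, List.getElem?_eq_getElem hcl']

theorem pvLoopA_trivial (m n : Int) (h : m ≤ 1 ∨ n ≤ 1) (fuel : Nat)
    (g : List (List (Option Char))) (ans : Int) : pvLoopA m n fuel g ans = ans := by
  cases fuel with
  | zero => rfl
  | succ f =>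
    simp only [pvLoopA]
    rw [pvScanA_trivial m n h g]
    simp


-- ===== VERDICT (by name: the statement is the Claim_ definition above) =====
set_option maxHeartbeats 2000000 in
theorem solution_spec : Claim_equal_solution := by
  unfold Claim_equal_solution Spec_solution
  intro m n board _ hpre
  by_cases hsmall : m < 2 ∨ n < 2
  · unfold solution solution_alt
    rw [if_pos hsmall]
    exact pvLoopA_trivial m n (by omega) _ _ _
  · unfold solution solution_alt
    rw [if_neg hsmall]
    push_neg at hsmall
    obtain ⟨hm2, hn2⟩ := hsmall
    have hpre' : m ≤ (board.length : Int) ∧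
        ∀ s ∈ board.take m.toNat, n ≤ (s.length : Int) := by
      rcases hpre with h | h | h
      · omega
      · omega
      · exact h
    obtain ⟨hA0, hB0, hW0⟩ := pvInit m n board hm2 hn2 hpre'.1 hpre'.2
    have hmc : ((m.toNat : Nat) : Int) = m := by omega
    have hnc : ((n.toNat : Nat) : Int) = n := by omega
    have hm' : 2 ≤ m.toNat := by omega
    have hn' : 2 ≤ n.toNat := by omega
    have h := pvLoop_eq (m' := m.toNat) (n' := n.toNat) hm' hn'
      (m.toNat * n.toNat + 1) (board.map (fun s => s.toList.map some))
      ((PySem.List.pyRange 0 n 1).map (fun j =>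
        (PySem.List.pyRange 0 m 1).map (fun i =>
          (some (((board.getD i.toNat "").toList).getD j.toNat ' ') : Option Char))))
      0 hA0 hB0 hW0
    rw [hmc, hnc] at h
    exact h
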